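-- pv_equiv track=rewrite | github.com/cardel/FADA | 2023-1/Corte1/1-Complejidad/2-Programa4.py | programa4
-- ===== SOURCE A (Python) =====
-- def programa4(n):
--   i = 1
--   cnt = 1 #i=1
--   while i <= n:
--       cnt+=1 #Entrada
--       k = i
--       cnt+=1 #k = i
--       while k<=n:
--          cnt+=1 #Entrada
--          k+=2
--          cnt+=1 #k+=2
--       cnt+=1 #Salida
--       k = 1
--       cnt+=1 #k=1
--       while k<=i:
--         cnt +=1 #Entrada
--         k=k+1
--         cnt+=1 #k=k+1
--       cnt+=1 #Salida
--       i+=2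
--       cnt+=1 #i+=2
--   cnt+=1 #Salida
--
--   return cnt
-- ===== SOURCE B (Python) =====
-- def programa4(n):
--     # Closed-form count: the outer loop runs over odd i = 1,3,...; summing
--     # the per-iteration operation counts gives a quadratic polynomial in
--     # m = number of odd values <= n.
--     if n < 1:
--         return 2
--     m = (n + 1) // 2
--     q = (n - 1) // 2
--     return 2 + m * (10 + 2 * q) + m * (m - 1)
-- ===== Notes on version B (the rewrite author's own statement) =====
-- stated objective: faster
-- what changed: Replaces A's nested counting while-loops by the closed-form quadratic polynomial 2 + m*(10+2q) + m*(m-1) in m = (n+1)//2, q = (n-1)//2, derived by summing the per-iteration operation counts.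
import Mathlib
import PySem

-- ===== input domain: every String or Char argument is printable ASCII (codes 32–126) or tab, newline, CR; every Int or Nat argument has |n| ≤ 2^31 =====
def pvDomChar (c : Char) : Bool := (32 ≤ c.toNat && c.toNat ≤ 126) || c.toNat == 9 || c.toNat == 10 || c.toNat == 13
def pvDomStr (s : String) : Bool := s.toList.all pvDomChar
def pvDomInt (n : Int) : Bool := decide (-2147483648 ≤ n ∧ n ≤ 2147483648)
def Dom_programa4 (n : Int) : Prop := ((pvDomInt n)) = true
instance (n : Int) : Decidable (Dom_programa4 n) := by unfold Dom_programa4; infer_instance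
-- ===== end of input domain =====

-- B replaces A's nested O(n^2) counting loops by the closed-form quadratic polynomial; objective: faster.

-- ===== PORT A =====
-- first inner while: while k <= n: cnt+=1; k+=2; cnt+=1
def pvLoop1 (n k cnt : Int) : Int :=
  if k ≤ n then pvLoop1 n (k + 2) (cnt + 2) else cnt
  termination_by (n + 1 - k).toNat
  decreasing_by omega

-- second inner while: while k <= i: cnt+=1; k=k+1; cnt+=1
def pvLoop2 (i k cnt : Int) : Int :=
  if k ≤ i then pvLoop2 i (k + 1) (cnt + 2) else cnt
  termination_by (i + 1 - k).toNat
  decreasing_by omega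

-- outer while: while i <= n: …body…; i+=2; cnt+=1
def pvOuter (n i cnt : Int) : Int :=
  if i ≤ n then
    pvOuter n (i + 2) (pvLoop2 i 1 (pvLoop1 n i (cnt + 2) + 2) + 2)
  else cnt
  termination_by (n + 1 - i).toNat
  decreasing_by omega

def programa4 (n : Int) : Int := pvOuter n 1 1 + 1

-- ===== PORT B =====
def programa4_alt (n : Int) : Int :=
  if n < 1 then 2
  else
    let m := PySem.Int.floordiv (n + 1) 2
    let q := PySem.Int.floordiv (n - 1) 2
    2 + m * (10 + 2 * q) + m * (m - 1)

-- ===== PRECONDITION & SPEC =====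
def Spec_programa4 (n : Int) (out : Int) : Prop := out = programa4_alt n
instance (n : Int) (out : Int) : Decidable (Spec_programa4 n out) := by unfold Spec_programa4; infer_instance

-- ===== CLAIM (what is proved, stated in full; the proofs are below) =====
def Claim_equal_programa4 : Prop := ∀ (n : Int), Dom_programa4 n → Spec_programa4 n (programa4 n)

-- ===== LEMMAS AND PROOFS =====

theorem pvLoop1_eq (n : Int) : ∀ (m : Nat) (k cnt : Int), (n + 1 - k).toNat ≤ m →
    pvLoop1 n k cnt = cnt + (if k ≤ n then 2 * (((n - k).toNat / 2 : Nat) + 1 : Int) else 0) := by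
  intro m
  induction m with
  | zero => intro k cnt h; rw [pvLoop1]; rw [if_neg (by omega), if_neg (by omega)]; ring
  | succ m ih =>
    intro k cnt h
    rw [pvLoop1]
    by_cases hk : k ≤ n
    · rw [if_pos hk, if_pos hk, ih (k + 2) (cnt + 2) (by omega)]
      by_cases hk2 : k + 2 ≤ n
      · rw [if_pos hk2]
        have : (n - k).toNat = (n - (k + 2)).toNat + 2 := by omega
        rw [this]
        have : ((n - (k + 2)).toNat + 2) / 2 = (n - (k + 2)).toNat / 2 + 1 := by omega
        rw [this]; push_cast; ring
      · rw [if_neg hk2]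
        have : (n - k).toNat / 2 = 0 := by omega
        rw [this]; ring
    · rw [if_neg hk, if_neg hk]; ring

theorem pvLoop2_eq (i : Int) : ∀ (m : Nat) (k cnt : Int), (i + 1 - k).toNat ≤ m →
    pvLoop2 i k cnt = cnt + 2 * ((i + 1 - k).toNat : Int) := by
  intro m
  induction m with
  | zero => intro k cnt h; rw [pvLoop2]; rw [if_neg (by omega)]; simp; omega
  | succ m ih =>
    intro k cnt h
    rw [pvLoop2]
    by_cases hk : k ≤ i
    · rw [if_pos hk, ih (k + 1) (cnt + 2) (by omega)]
      have : (i + 1 - k).toNat = (i + 1 - (k + 1)).toNat + 1 := by omega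
      rw [this]; push_cast; ring
    · rw [if_neg hk]
      have : (i + 1 - k).toNat = 0 := by omega
      rw [this]; simp

-- closed form of one outer-loop tail: t = number of remaining outer iterations
theorem pvOuter_eq (n : Int) : ∀ (m : Nat) (i cnt : Int), (n + 1 - i).toNat ≤ m → 1 ≤ i →
    pvOuter n i cnt = cnt +
      (if i ≤ n then (let t : Int := (((n - i).toNat / 2 : Nat) + 1 : Int); t * (3 * t + 2 * i + 5)) else 0) := by
  intro m
  induction m with
  | zero => intro i cnt h hi; rw [pvOuter]; rw [if_neg (by omega), if_neg (by omega)]; ring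
  | succ m ih =>
    intro i cnt h hi
    rw [pvOuter]
    by_cases hin : i ≤ n
    · rw [if_pos hin, if_pos hin,
        pvLoop1_eq n ((n + 1 - i).toNat) i (cnt + 2) (by omega),
        pvLoop2_eq i ((i + 1 - 1).toNat) 1 _ (by omega),
        ih (i + 2) _ (by omega) (by omega)]
      rw [if_pos hin]
      have hi1 : ((i + 1 - 1).toNat : Int) = i := by omega
      rw [hi1]
      by_cases hin2 : i + 2 ≤ n
      · rw [if_pos hin2]
        have h2 : (n - i).toNat = (n - (i + 2)).toNat + 2 := by omega
        rw [h2]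
        have h3 : ((n - (i + 2)).toNat + 2) / 2 = (n - (i + 2)).toNat / 2 + 1 := by omega
        rw [h3]
        push_cast; ring
      · rw [if_neg hin2]
        have h2 : (n - i).toNat / 2 = 0 := by omega
        rw [h2]; push_cast; ring
    · rw [if_neg hin, if_neg hin]; ring

-- ===== VERDICT (by name: the statement is the Claim_ definition above) =====
theorem programa4_spec : Claim_equal_programa4 := by
  intro n _
  unfold Spec_programa4 programa4 programa4_alt
  rw [pvOuter_eq n ((n + 1 - 1).toNat) 1 1 (le_refl _) (le_refl _)]
  by_cases hn : n < 1
  · rw [if_neg (by omega), if_pos hn]; ring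
  · rw [if_pos (by omega), if_neg hn]
    simp only []
    rw [PySem.Int.floordiv_eq_ediv_of_pos (by omega : (0:Int) < 2),
        PySem.Int.floordiv_eq_ediv_of_pos (by omega : (0:Int) < 2)]
    have hm : (n + 1) / 2 = (((n - 1).toNat / 2 : Nat) : Int) + 1 := by omega
    have hq : (n - 1) / 2 = (((n - 1).toNat / 2 : Nat) : Int) := by omega
    rw [hm, hq]
    ring
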